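-- pv_equiv track=rewrite | github.com/imshenza/flames | app.py | find_common_pairs
-- ===== SOURCE A (Python) =====
-- def find_common_pairs(a_chars, b_chars):
--     """
--     Find pairs of indices (i,j) where a_chars[i] matches b_chars[j] (first available).
--     Returns list of (i,j) in the order we find them.
--     """
--     removed_a = [False]*len(a_chars)
--     removed_b = [False]*len(b_chars)
--     pairs = []
--     for i, ch in enumerate(a_chars):
--         for j, ch2 in enumerate(b_chars):
--             if not removed_b[j] and ch == ch2:
--                 removed_a[i] = True
--                 removed_b[j] = True
--                 pairs.append((i, j))
--                 break
--     return pairs, removed_a, removed_b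
-- ===== SOURCE B (Python) =====
-- def find_common_pairs(a_chars, b_chars):
--     """
--     Find pairs of indices (i,j) where a_chars[i] matches b_chars[j] (first available).
--     Returns list of (i,j) in the order we find them.
--     """
--     positions = {}
--     for j, ch in enumerate(b_chars):
--         positions.setdefault(ch, []).append(j)
--     used = {}
--     pairs = []
--     for i, ch in enumerate(a_chars):
--         k = used.get(ch, 0)
--         pos = positions.get(ch, [])
--         if k < len(pos):
--             used[ch] = k + 1
--             pairs.append((i, pos[k]))
--     matched_a = {i for i, _ in pairs}
--     matched_b = {j for _, j in pairs}
--     removed_a = [i in matched_a for i in range(len(a_chars))]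
--     removed_b = [j in matched_b for j in range(len(b_chars))]
--     return pairs, removed_a, removed_b
-- ===== Notes on version B (the rewrite author's own statement) =====
-- stated objective: faster
-- what changed: Instead of rescanning b_chars for every a-char and threading three mutable states, B builds one position-index dict for b_chars, walks a_chars once advancing a per-character counter (no inner scan), and derives removed_a/removed_b afterwards by membership in the matched index sets.
import Mathlib
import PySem

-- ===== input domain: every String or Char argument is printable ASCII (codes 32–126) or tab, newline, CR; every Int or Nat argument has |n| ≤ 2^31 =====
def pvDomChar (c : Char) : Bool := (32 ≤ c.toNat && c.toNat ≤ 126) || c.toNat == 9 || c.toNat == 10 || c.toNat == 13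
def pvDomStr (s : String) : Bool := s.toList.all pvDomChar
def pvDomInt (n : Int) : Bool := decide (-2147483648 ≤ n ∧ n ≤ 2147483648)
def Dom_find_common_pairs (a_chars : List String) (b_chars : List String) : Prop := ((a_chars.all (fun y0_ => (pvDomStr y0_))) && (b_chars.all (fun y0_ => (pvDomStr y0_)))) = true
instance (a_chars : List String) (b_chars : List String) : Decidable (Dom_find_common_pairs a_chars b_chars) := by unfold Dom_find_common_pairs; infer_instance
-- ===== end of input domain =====

-- B builds one position-index dict for b_chars, walks a_chars once advancing a per-character
-- counter (no inner rescan of b_chars), and derives removed_a/removed_b afterwards by membership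
-- in the matched index sets (objective: faster).

-- ===== PORT A =====
-- enumerate(xs) with a running counter
def pvEnum (k : Nat) : List String → List (Nat × String)
  | [] => []
  | x :: xs => (k, x) :: pvEnum (k + 1) xs

-- A's inner loop: first j (scanning enumerate(b_chars)) with not removed_b[j] and ch == ch2, break
def pvAInner (ch : String) (rb : List Bool) : List (Nat × String) → Option Nat
  | [] => none
  | (j, ch2) :: rest =>
    if (!(rb.getD j false)) && ch == ch2 then some j else pvAInner ch rb rest

-- A's outer loop over enumerate(a_chars), threading removed_a, removed_b, pairs
def pvAOuter (eb : List (Nat × String)) :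
    List (Nat × String) → List Bool → List Bool → List (Int × Int) →
    (List (Int × Int)) × List Bool × List Bool
  | [], ra, rb, ps => (ps, ra, rb)
  | (i, ch) :: rest, ra, rb, ps =>
    match pvAInner ch rb eb with
    | none => pvAOuter eb rest ra rb ps
    | some j => pvAOuter eb rest (ra.set i true) (rb.set j true) (ps ++ [((i : Int), (j : Int))])

def find_common_pairs (a_chars : List String) (b_chars : List String) :
    (List (Int × Int)) × List Bool × List Bool :=
  pvAOuter (pvEnum 0 b_chars) (pvEnum 0 a_chars)
    (List.replicate a_chars.length false) (List.replicate b_chars.length false) []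

-- ===== PORT B =====
-- positions.setdefault(ch, []).append(j) over enumerate(b_chars)
def pvBPos (b_chars : List String) : PySem.Dict String (List Int) :=
  (PySem.List.enumerate b_chars 0).foldl
    (fun d p => d.insert p.2 ((d.getD p.2 []) ++ [p.1])) PySem.Dict.empty

-- B's single pass over enumerate(a_chars): k = used.get(ch, 0); if k < len(pos): used[ch] = k+1
def pvBPairs (pos : PySem.Dict String (List Int)) :
    List (Int × String) → PySem.Dict String Int → List (Int × Int) → List (Int × Int)
  | [], _, ps => ps
  | (i, ch) :: rest, used, ps =>
    let k := used.getD ch 0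
    let q := pos.getD ch []
    if k < (q.length : Int) then
      pvBPairs pos rest (used.insert ch (k + 1)) (ps ++ [(i, PySem.List.pyGetD q k 0)])
    else
      pvBPairs pos rest used ps

def find_common_pairs_alt (a_chars : List String) (b_chars : List String) :
    (List (Int × Int)) × List Bool × List Bool :=
  let pairs := pvBPairs (pvBPos b_chars) (PySem.List.enumerate a_chars 0) PySem.Dict.empty []
  let matched_a : PySem.Set Int := PySem.Set.ofList (pairs.map (fun p => p.1))
  let matched_b : PySem.Set Int := PySem.Set.ofList (pairs.map (fun p => p.2))
  (pairs,
   (PySem.List.pyRange 0 (a_chars.length : Int) 1).map (fun i => matched_a.contains i),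
   (PySem.List.pyRange 0 (b_chars.length : Int) 1).map (fun j => matched_b.contains j))

-- ===== PRECONDITION & SPEC =====
def Spec_find_common_pairs (a_chars : List String) (b_chars : List String) (out : (List (Int × Int)) × List Bool × List Bool) : Prop := out = find_common_pairs_alt a_chars b_chars
instance (a_chars : List String) (b_chars : List String) (out : (List (Int × Int)) × List Bool × List Bool) : Decidable (Spec_find_common_pairs a_chars b_chars out) := by unfold Spec_find_common_pairs; infer_instance

-- ===== CLAIM (what is proved, stated in full; the proofs are below) =====
def Claim_equal_find_common_pairs : Prop := ∀ (a_chars : List String) (b_chars : List String), Dom_find_common_pairs a_chars b_chars → Spec_find_common_pairs a_chars b_chars (find_common_pairs a_chars b_chars)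

-- ===== LEMMAS AND PROOFS =====


-- the list of still-available positions of character c among b-suffix l starting at index k
def avail (rb : List Bool) (c : String) : Nat → List String → List Nat
  | _, [] => []
  | k, x :: xs =>
    if (!(rb.getD k false)) && (x == c) then k :: avail rb c (k + 1) xs else avail rb c (k + 1) xs

-- all positions of c in b (nothing removed yet)
def pvOcc (b : List String) (c : String) : List Nat := avail (List.replicate b.length false) c 0 b

-- the abstract greedy matching both programs compute: for each (i, ch) take the first available j
def pvGreedy (b : List String) : List (Nat × String) → List Bool → List (Nat × Nat)
  | [], _ => []
  | (i, ch) :: rest, rb =>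
    match (avail rb ch 0 b).head? with
    | none => pvGreedy b rest rb
    | some j => (i, j) :: pvGreedy b rest (rb.set j true)

-- A's in-place marking, as a fold
def setTrues (xs : List Bool) (l : List Nat) : List Bool := l.foldl (fun ys i => ys.set i true) xs

-- A's inner scan returns exactly the first available position of ch
theorem pvAInner_eq_head (ch : String) (rb : List Bool) (k : Nat) (l : List String) :
    pvAInner ch rb (pvEnum k l) = (avail rb ch k l).head? := by
  induction l generalizing k with
  | nil => rfl
  | cons x xs ih =>
    simp only [pvEnum, pvAInner, avail, List.getD]
    by_cases hr : rb[k]?.getD false = false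
    · by_cases hx : ch = x
      · subst hx; simp [hr]
      · have h1 : (ch == x) = false := by simp [hx]
        have h2 : (x == ch) = false := by simp [Ne.symm hx]
        simp [hr, h1, h2, ih]
    · simp only [Bool.not_eq_false] at hr
      simp [hr, ih]

theorem mem_avail_lb {rb : List Bool} {c : String} {k j : Nat} {l : List String}
    (h : j ∈ avail rb c k l) : k ≤ j := by
  induction l generalizing k with
  | nil => simp [avail] at h
  | cons x xs ih =>
    simp only [avail] at h
    split at h
    · rcases List.mem_cons.1 h with h | h
      · omega
      · have := ih h; omega
    · have := ih h; omega

theorem mem_avail_ub {rb : List Bool} {c : String} {k j : Nat} {l : List String}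
    (h : j ∈ avail rb c k l) : j < k + l.length := by
  induction l generalizing k with
  | nil => simp [avail] at h
  | cons x xs ih =>
    simp only [avail] at h
    split at h
    · rcases List.mem_cons.1 h with h | h
      · subst h; simp only [List.length_cons]; omega
      · have := ih h; simp only [List.length_cons]; omega
    · have := ih h; simp only [List.length_cons]; omega

-- setting position j of rb to true deletes j (and nothing else) from every avail list
theorem avail_set_true (rb : List Bool) (c : String) (j : Nat) (hj : j < rb.length)
    (k : Nat) (l : List String) :
    avail (rb.set j true) c k l = (avail rb c k l).filter (fun k' => k' ≠ j) := by
  induction l generalizing k with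
  | nil => rfl
  | cons x xs ih =>
    simp only [avail, List.getD]
    by_cases hk : k = j
    · subst hk
      have h1 : (rb.set k true)[k]?.getD false = true := by
        simp [hj]
      simp only [h1]
      by_cases hr : rb[k]?.getD false <;> by_cases hx : (x == c) <;>
        simp [hr, hx, ih]
    · have h1 : (rb.set j true)[k]? = rb[k]? := List.getElem?_set_ne (by omega : j ≠ k)
      simp only [h1]
      by_cases hr : rb[k]?.getD false <;> by_cases hx : (x == c) <;>
        simp [hr, hx, ih, hk]

theorem mem_avail_char {rb : List Bool} {c : String} {k j : Nat} {l : List String}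
    (h : j ∈ avail rb c k l) : l.getD (j - k) "" = c := by
  induction l generalizing k with
  | nil => simp [avail] at h
  | cons x xs ih =>
    simp only [avail] at h
    split at h
    · next hc =>
      rcases List.mem_cons.1 h with h | h
      · subst h; simpa using (Bool.and_elim_right hc)
      · have hlb := mem_avail_lb h
        have := ih h
        have hjk : j - k = (j - (k + 1)) + 1 := by omega
        simpa [hjk] using this
    · next hc =>
      have hlb := mem_avail_lb h
      have := ih h
      have hjk : j - k = (j - (k + 1)) + 1 := by omega
      simpa [hjk] using this

-- elements of avail are strictly increasing
theorem avail_pairwise (rb : List Bool) (c : String) (k : Nat) (l : List String) :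
    (avail rb c k l).Pairwise (· < ·) := by
  induction l generalizing k with
  | nil => exact List.Pairwise.nil
  | cons x xs ih =>
    simp only [avail]
    split
    · exact List.pairwise_cons.2 ⟨fun j hj => by have := mem_avail_lb hj; omega, ih (k + 1)⟩
    · exact ih (k + 1)

theorem getD_replicate_false (m k : Nat) : (List.replicate m false).getD k false = false := by
  simp only [List.getD, List.getElem?_replicate]
  split <;> rfl

-- avail is insensitive to the length of an all-false rb
theorem avail_replicate (c : String) (k : Nat) (l : List String) (m m' : Nat) :
    avail (List.replicate m false) c k l = avail (List.replicate m' false) c k l := by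
  induction l generalizing k with
  | nil => rfl
  | cons x xs ih =>
    simp only [avail, getD_replicate_false, ih]

-- ---- A decomposes into the abstract greedy matching ----
theorem A_decomp (b : List String) :
    ∀ (e : List (Nat × String)) (ra rb : List Bool) (ps : List (Int × Int)),
    pvAOuter (pvEnum 0 b) e ra rb ps =
      (ps ++ (pvGreedy b e rb).map (fun p => ((p.1 : Int), (p.2 : Int))),
       setTrues ra ((pvGreedy b e rb).map (fun p => p.1)),
       setTrues rb ((pvGreedy b e rb).map (fun p => p.2))) := by
  intro e
  induction e with
  | nil => intro ra rb ps; simp [pvAOuter, pvGreedy, setTrues]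
  | cons p rest ih =>
    obtain ⟨i, ch⟩ := p
    intro ra rb ps
    simp only [pvAOuter, pvGreedy, pvAInner_eq_head]
    cases h : (avail rb ch 0 b).head? with
    | none => exact ih ra rb ps
    | some j =>
      simp only [ih, List.map_cons, List.append_assoc, List.singleton_append]
      rfl

-- ---- bridge: PySem.List.enumerate is pvEnum with Int indices ----
theorem enumerate_eq_pvEnum (l : List String) (k : Nat) :
    PySem.List.enumerate l (k : Int) = (pvEnum k l).map (fun p => ((p.1 : Int), p.2)) := by
  induction l generalizing k with
  | nil => rfl
  | cons x xs ih =>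
    rw [PySem.List.enumerate_cons, pvEnum]
    have : ((k : Int) + 1) = ((k + 1 : Nat) : Int) := by push_cast; ring
    rw [this, ih]
    rfl

-- ---- the position dict holds exactly the occurrence lists ----
theorem pvBPos_fold (c : String) (l : List String) (k : Nat) (d : PySem.Dict String (List Int)) :
    (((pvEnum k l).map (fun p => ((p.1 : Int), p.2))).foldl
        (fun d p => d.insert p.2 ((d.getD p.2 []) ++ [p.1])) d).getD c [] =
      d.getD c [] ++ (avail (List.replicate 0 false) c k l).map Int.ofNat := by
  induction l generalizing k d with
  | nil => simp [pvEnum, avail]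
  | cons x xs ih =>
    simp only [pvEnum, List.map_cons, List.foldl_cons, avail, getD_replicate_false]
    rw [ih]
    by_cases hx : x = c
    · subst hx; simp
    · have hx' : (x == c) = false := by simp [hx]
      simp [PySem.Dict.getD_insert, Ne.symm hx, hx']

theorem pvBPos_getD (b : List String) (c : String) :
    (pvBPos b).getD c [] = (pvOcc b c).map Int.ofNat := by
  unfold pvBPos pvOcc
  have h0 : (0 : Int) = ((0 : Nat) : Int) := rfl
  rw [h0, enumerate_eq_pvEnum, pvBPos_fold]
  have he : (PySem.Dict.empty : PySem.Dict String (List Int)).getD c [] = [] := by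
    simp [PySem.Dict.getD_eq_get?_getD]
  rw [he, List.nil_append, avail_replicate c 0 b 0 b.length]

-- ---- B's counter pass computes the abstract greedy matching ----
theorem B_pairs (b : List String) :
    ∀ (e : List (Nat × String)) (used : PySem.Dict String Int) (rb : List Bool)
      (ps : List (Int × Int)),
      rb.length = b.length →
      (∀ c, 0 ≤ used.getD c 0 ∧
            avail rb c 0 b = (pvOcc b c).drop (used.getD c 0).toNat) →
      pvBPairs (pvBPos b) (e.map (fun p => ((p.1 : Int), p.2))) used ps =
        ps ++ (pvGreedy b e rb).map (fun p => ((p.1 : Int), (p.2 : Int))) := by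
  intro e
  induction e with
  | nil => intro used rb ps _ _; simp [pvBPairs, pvGreedy]
  | cons p rest ih =>
    obtain ⟨i, ch⟩ := p
    intro used rb ps hlen hinv
    obtain ⟨hk0, hdrop⟩ := hinv ch
    simp only [List.map_cons, pvBPairs, pvBPos_getD, pvGreedy]
    set k : Int := used.getD ch 0 with hkdef
    have hqlen : (((pvOcc b ch).map Int.ofNat).length : Int) = ((pvOcc b ch).length : Int) := by
      simp
    by_cases hk : k < (((pvOcc b ch).map Int.ofNat).length : Int)
    · have hklt : k.toNat < (pvOcc b ch).length := by
        rw [hqlen] at hk; omega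
      have hhead : (avail rb ch 0 b).head? = some ((pvOcc b ch)[k.toNat]) := by
        rw [hdrop, List.head?_drop, List.getElem?_eq_getElem hklt]
      have hget : PySem.List.pyGetD ((pvOcc b ch).map Int.ofNat) k 0 =
          (((pvOcc b ch)[k.toNat] : Nat) : Int) := by
        rw [PySem.List.pyGetD_of_nonneg _ 0 hk0]
        rw [List.getD_eq_getElem?_getD, List.getElem?_map,
          List.getElem?_eq_getElem hklt]
        rfl
      rw [if_pos hk, hhead]
      set j : Nat := (pvOcc b ch)[k.toNat] with hjdef
      have hjmem : j ∈ avail rb ch 0 b := by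
        rw [hdrop, List.drop_eq_getElem_cons hklt]
        exact List.mem_cons_self
      have hjlt : j < rb.length := by
        have := mem_avail_ub hjmem; omega
      have hjch : b.getD j "" = ch := by simpa using mem_avail_char hjmem
      rw [hget, ih (used.insert ch (k + 1)) (rb.set j true) (ps ++ [((i : Int), (j : Int))])
        (by simpa using hlen) ?_]
      · simp only [List.map_cons, List.append_assoc, List.singleton_append]
      · intro c
        rw [PySem.Dict.getD_insert, avail_set_true rb c j hjlt 0 b]
        by_cases hc : c = ch
        · subst hc
          rw [if_pos rfl]
          constructor
          · omega
          · have htn : (k + 1).toNat = k.toNat + 1 := by omega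
            rw [htn, hdrop, List.drop_eq_getElem_cons hklt, ← hjdef, List.filter_cons]
            have hpw : ((pvOcc b c).drop k.toNat).Pairwise (· < ·) := by
              rw [← hdrop]; exact avail_pairwise rb c 0 b
            rw [List.drop_eq_getElem_cons hklt, ← hjdef] at hpw
            have hnot : j ∉ (pvOcc b c).drop (k.toNat + 1) := fun hmem => by
              have := (List.pairwise_cons.1 hpw).1 j hmem; omega
            simp only [ne_eq, not_true_eq_false, decide_false, Bool.false_eq_true, if_false]
            exact List.filter_eq_self.2 (fun a ha => by
              simp only [decide_eq_true_eq]
              exact fun h => hnot (h ▸ ha))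
        · rw [if_neg hc]
          obtain ⟨hc0, hcd⟩ := hinv c
          refine ⟨hc0, ?_⟩
          have hnj : j ∉ avail rb c 0 b := fun hmem => by
            have := mem_avail_char hmem
            simp only [Nat.sub_zero] at this hjch
            exact hc (hjch ▸ this ▸ rfl)
          rw [← hcd]
          exact List.filter_eq_self.2 (fun a ha => by
            simp only [ne_eq, decide_eq_true_eq]
            exact fun h => hnj (h ▸ ha))
    · have hklen : (pvOcc b ch).length ≤ k.toNat := by
        rw [hqlen] at hk; omega
      have hhead : (avail rb ch 0 b).head? = none := by
        rw [hdrop, List.head?_drop, List.getElem?_eq_none (by omega)]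
      rw [if_neg hk, hhead]
      exact ih used rb ps hlen (fun c => hinv c)

-- ---- marking a list of positions = membership test over range ----
theorem length_setTrues (l : List Nat) (xs : List Bool) :
    (setTrues xs l).length = xs.length := by
  induction l generalizing xs with
  | nil => rfl
  | cons j rest ih =>
    simp only [setTrues, List.foldl_cons] at *
    rw [ih]; simp

theorem getElem?_setTrues (l : List Nat) (xs : List Bool) (i : Nat) (hi : i < xs.length) :
    (setTrues xs l)[i]?.getD false = (xs[i]?.getD false || l.contains i) := by
  induction l generalizing xs with
  | nil => simp [setTrues]
  | cons j rest ih =>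
    simp only [setTrues, List.foldl_cons] at *
    rw [ih (xs.set j true) (by simpa using hi)]
    by_cases hij : i = j
    · subst hij
      rw [List.getElem?_set_self (by omega)]
      simp
    · rw [List.getElem?_set_ne (fun h => hij h.symm)]
      simp [hij]

theorem setTrues_eq_map (n : Nat) (L : List Nat) (M : List Int)
    (hM : ∀ i : Nat, (i : Int) ∈ M ↔ i ∈ L) :
    setTrues (List.replicate n false) L =
      (PySem.List.pyRange 0 (n : Int) 1).map (fun i => (PySem.Set.ofList M).contains i) := by
  rw [PySem.List.pyRange_zero_natCast, List.map_map]
  apply List.ext_getElem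
  · rw [length_setTrues]; simp
  · intro i h1 h2
    have hin : i < n := by simpa using h2
    have hset : (setTrues (List.replicate n false) L)[i]?.getD false = L.contains i := by
      rw [getElem?_setTrues L _ i (by simpa using hin)]
      simp
    rw [List.getElem?_eq_getElem h1] at hset
    simp only [Option.getD_some] at hset
    rw [hset, List.getElem_map, List.getElem_range]
    show L.contains i = List.contains (PySem.Set.ofList M) (i : Int)
    rw [List.contains_eq_mem, List.contains_eq_mem]
    exact decide_eq_decide.2 (by rw [PySem.Set.mem_ofList]; exact (hM i).symm)

-- ===== VERDICT (by name: the statement is the Claim_ definition above) =====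
theorem find_common_pairs_spec : Claim_equal_find_common_pairs := by
  intro a b _
  unfold Spec_find_common_pairs find_common_pairs find_common_pairs_alt
  rw [A_decomp]
  set G := pvGreedy b (pvEnum 0 a) (List.replicate b.length false) with hG
  have hpairs : pvBPairs (pvBPos b) (PySem.List.enumerate a 0) PySem.Dict.empty [] =
      G.map (fun p => ((p.1 : Int), (p.2 : Int))) := by
    have h0 : (0 : Int) = ((0 : Nat) : Int) := rfl
    rw [h0, enumerate_eq_pvEnum, B_pairs b (pvEnum 0 a) PySem.Dict.empty
      (List.replicate b.length false) [] (by simp) ?_, List.nil_append]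
    intro c
    have he : (PySem.Dict.empty : PySem.Dict String Int).getD c 0 = 0 := by
      simp [PySem.Dict.getD_eq_get?_getD]
    rw [he]
    exact ⟨le_refl 0, by simp [pvOcc]⟩
  have hfst : ∀ i : Nat,
      (i : Int) ∈ (G.map (fun p => ((p.1 : Int), (p.2 : Int)))).map (fun p => p.1) ↔
      i ∈ G.map (fun p => p.1) := by
    intro i
    simp only [List.map_map, List.mem_map, Function.comp]
    constructor
    · rintro ⟨p, hp, hpe⟩
      exact ⟨p, hp, by omega⟩
    · rintro ⟨p, hp, hpe⟩
      exact ⟨p, hp, by omega⟩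
  have hsnd : ∀ i : Nat,
      (i : Int) ∈ (G.map (fun p => ((p.1 : Int), (p.2 : Int)))).map (fun p => p.2) ↔
      i ∈ G.map (fun p => p.2) := by
    intro i
    simp only [List.map_map, List.mem_map, Function.comp]
    constructor
    · rintro ⟨p, hp, hpe⟩
      exact ⟨p, hp, by omega⟩
    · rintro ⟨p, hp, hpe⟩
      exact ⟨p, hp, by omega⟩
  have h1 := setTrues_eq_map a.length (G.map (fun p => p.1))
      ((G.map (fun p => ((p.1 : Int), (p.2 : Int)))).map (fun p => p.1)) hfst
  have h2 := setTrues_eq_map b.length (G.map (fun p => p.2))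
      ((G.map (fun p => ((p.1 : Int), (p.2 : Int)))).map (fun p => p.2)) hsnd
  simp only [hpairs, h1, h2, List.nil_append]
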